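-- pv_equiv track=rewrite | github.com/TruongXuanHieu-H/ism-kissat-main | methods/binomial.py | at_least_k
-- ===== SOURCE A (Python) =====
-- def at_least_k(n, k, offset):
--     """
--         Create clause for constraint: At least k variables in a set of given n variables are True
--
--         Args:
--             k (int): The number of variables must be True
--             n (int): The number of given variables
--             offset (int): The offset of variables compared to 1
--     """
--     def backtrack(start, combination):
--         if len(combination) == combination_length:
--             combinations_list.append(combination[:])
--             return
--         for i in range(start, n + 1):
--             combination.append(i + offset)
--             backtrack(i + 1, combination)
--             combination.pop()
--     combination_length = n - k + 1
--     combinations_list = []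
--     backtrack(1, [])
--     return combinations_list
-- ===== SOURCE B (Python) =====
-- from itertools import combinations
--
-- def at_least_k(n, k, offset):
--     r = n - k + 1
--     if r < 0 or r > max(n, 0):
--         return []
--     return [list(c) for c in combinations(range(1 + offset, n + offset + 1), r)]
-- ===== Notes on version B (the rewrite author's own statement) =====
-- stated objective: idiomatic
-- what changed: Replaces the hand-written recursive backtracking with a list-append accumulator by a direct itertools.combinations call over range(1+offset, n+offset+1) with r = n-k+1 (guarding r < 0 and r > max(n,0), where combinations would raise or over-allocate), yielding the same size-r subsets in the same lexicographic order.
import Mathlib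
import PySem

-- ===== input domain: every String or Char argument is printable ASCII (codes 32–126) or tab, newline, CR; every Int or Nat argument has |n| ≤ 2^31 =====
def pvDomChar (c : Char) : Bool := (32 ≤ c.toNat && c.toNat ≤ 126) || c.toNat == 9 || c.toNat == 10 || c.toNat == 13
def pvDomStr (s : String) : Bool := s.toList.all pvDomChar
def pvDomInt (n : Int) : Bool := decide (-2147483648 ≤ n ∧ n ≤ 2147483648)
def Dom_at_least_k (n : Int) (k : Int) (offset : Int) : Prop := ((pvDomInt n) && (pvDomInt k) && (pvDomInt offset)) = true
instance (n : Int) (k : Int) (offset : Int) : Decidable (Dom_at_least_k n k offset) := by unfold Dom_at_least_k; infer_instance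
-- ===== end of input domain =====

-- B replaces A's recursive backtracking by the standard combinations generator (itertools.combinations);
-- same return value, different decomposition (idiomatic).

-- ===== PORT A =====
-- A's inner recursive `backtrack`: the for-loop `for i in range(start, n+1)` with a recursive call and
-- pop becomes a flatMap over the same range; appending `combination[:]` to the global list corresponds
-- to the singleton `[comb]`, collected in depth-first order by the flatMap concatenation.
def backtrackA (n : Int) (offset : Int) (L : Int) (start : Int) (comb : List Int) : List (List Int) :=
  if (comb.length : Int) = L then [comb]
  else
    (PySem.List.pyRange start (n + 1) 1).attach.flatMap
      (fun p => backtrackA n offset L (p.1 + 1) (comb ++ [p.1 + offset]))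
termination_by (n + 1 - start).toNat
decreasing_by
  have h := (PySem.List.mem_pyRange_one).1 p.2
  omega

def at_least_k (n : Int) (k : Int) (offset : Int) : List (List Int) :=
  backtrackA n offset (n - k + 1) 1 []

-- ===== PORT B =====
-- Port of itertools.combinations(xs, r) producing lists, in the same lexicographic order.
def combosB : List Int → Nat → List (List Int)
  | _, 0 => [[]]
  | [], _ + 1 => []
  | x :: rest, r + 1 => (combosB rest r).map (x :: ·) ++ combosB rest (r + 1)

def at_least_k_alt (n : Int) (k : Int) (offset : Int) : List (List Int) :=
  let r := n - k + 1
  if r < 0 ∨ max n 0 < r then []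
  else combosB (PySem.List.pyRange (1 + offset) (n + offset + 1) 1) r.toNat

-- ===== PRECONDITION & SPEC =====
-- Pre_ excludes the inputs on which A raises RecursionError: backtrack recurses to depth
-- min(n, n-k+1) (or n when n-k+1 < 0), which exceeds Python's recursion limit for large n
-- with large-or-negative n-k+1; the 9000 bound leaves a safety margin below that limit.
def Pre_at_least_k (n : Int) (k : Int) (offset : Int) : Prop :=
  n ≤ 9000 ∨ (0 ≤ n - k + 1 ∧ n - k + 1 ≤ 9000)
instance (n : Int) (k : Int) (offset : Int) : Decidable (Pre_at_least_k n k offset) := by unfold Pre_at_least_k; infer_instance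
def pvWitness_at_least_k : Int × Int × Int := (5, 2, 0)

def Spec_at_least_k (n : Int) (k : Int) (offset : Int) (out : List (List Int)) : Prop := out = at_least_k_alt n k offset
instance (n : Int) (k : Int) (offset : Int) (out : List (List Int)) : Decidable (Spec_at_least_k n k offset out) := by unfold Spec_at_least_k; infer_instance

-- ===== CLAIM (what is proved, stated in full; the proofs are below) =====
def Claim_equal_at_least_k : Prop := ∀ (n : Int) (k : Int) (offset : Int), Dom_at_least_k n k offset → Pre_at_least_k n k offset → Spec_at_least_k n k offset (at_least_k n k offset)

-- ===== LEMMAS AND PROOFS =====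

-- combinations on a contiguous range, unfolded by first chosen element
lemma combosB_pyRange_succ (d : Nat) : ∀ (m : Nat) (a b : Int), (b - a).toNat ≤ m →
    combosB (PySem.List.pyRange a b 1) (d + 1)
      = (PySem.List.pyRange a b 1).flatMap
          (fun i => (combosB (PySem.List.pyRange (i + 1) b 1) d).map (i :: ·)) := by
  intro m
  induction m with
  | zero =>
    intro a b h
    rw [PySem.List.pyRange_one_eq_nil (by omega)]
    rfl
  | succ m ih =>
    intro a b h
    by_cases hab : b ≤ a
    · rw [PySem.List.pyRange_one_eq_nil hab]; rfl
    · rw [PySem.List.pyRange_one_cons (by omega)]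
      simp only [combosB, List.flatMap_cons]
      rw [ih (a + 1) b (by omega)]

-- A's backtracking equals combinations over the remaining range, prefixed by the current partial combination
lemma backtrackA_eq (n offset L : Int) : ∀ (m : Nat) (start : Int) (comb : List Int) (d : Nat),
    (n + 1 - start).toNat ≤ m → (comb.length : Int) + d = L →
    backtrackA n offset L start comb
      = (combosB (PySem.List.pyRange (start + offset) (n + 1 + offset) 1) d).map (comb ++ ·) := by
  intro m
  induction m with
  | zero =>
    intro start comb d hm hL
    rw [backtrackA]
    cases d with
    | zero => simp [combosB, hL.symm]
    | succ d =>
      rw [if_neg (by omega), PySem.List.pyRange_one_eq_nil (by omega)]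
      rw [PySem.List.pyRange_one_eq_nil (by omega)]
      rfl
  | succ m ih =>
    intro start comb d hm hL
    rw [backtrackA]
    cases d with
    | zero => simp [combosB, hL.symm]
    | succ d =>
      rw [if_neg (by omega)]
      rw [combosB_pyRange_succ d (m + 1) (start + offset) (n + 1 + offset) (by omega)]
      have hshift : PySem.List.pyRange (start + offset) (n + 1 + offset) 1
          = (PySem.List.pyRange start (n + 1) 1).map (· + offset) := by
        simp only [PySem.List.pyRange_one, List.map_map]
        have : (n + 1 + offset - (start + offset)) = (n + 1 - start) := by ring
        rw [this]
        apply List.map_congr_left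
        intro k _
        simp; ring
      simp only [List.flatMap_subtype, List.unattach_attach]
      rw [hshift, List.map_flatMap, List.flatMap_map]
      apply List.flatMap_congr  -- pointwise equality of the flatMap bodies
      intro i hi
      have hmem := (PySem.List.mem_pyRange_one).1 hi
      rw [ih (i + 1) (comb ++ [i + offset]) d (by omega) (by simp; omega)]
      have : i + offset + 1 = i + 1 + offset := by ring
      rw [this, List.map_map]
      apply List.map_congr_left
      intro c _
      simp

-- combinations(xs, r) is empty when r exceeds the number of elements
lemma combosB_eq_nil : ∀ (xs : List Int) (r : Nat), xs.length < r → combosB xs r = [] := by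
  intro xs
  induction xs with
  | nil =>
    intro r h
    cases r with
    | zero => omega
    | succ r => rfl
  | cons x rest ih =>
    intro r h
    cases r with
    | zero => omega
    | succ r =>
      simp only [List.length_cons] at h
      simp [combosB, ih r (by omega), ih (r + 1) (by omega)]

theorem at_least_k_spec : Claim_equal_at_least_k := by
  intro n k offset _ _
  unfold Spec_at_least_k at_least_k at_least_k_alt
  by_cases hr : n - k + 1 < 0
  · rw [if_pos (Or.inl hr)]
    -- combination_length is negative: the length test never fires and every range is finite, so A returns []
    have hnil : ∀ (m : Nat) (start : Int) (comb : List Int), (n + 1 - start).toNat ≤ m →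
        backtrackA n offset (n - k + 1) start comb = [] := by
      intro m
      induction m with
      | zero =>
        intro start comb hm
        rw [backtrackA, if_neg (by omega), PySem.List.pyRange_one_eq_nil (by omega)]
        rfl
      | succ m ihm =>
        intro start comb hm
        rw [backtrackA, if_neg (by omega)]
        simp only [List.flatMap_subtype, List.unattach_attach]
        apply List.flatMap_eq_nil_iff.2
        intro i hi
        have hmem := (PySem.List.mem_pyRange_one).1 hi
        exact ihm (i + 1) (comb ++ [i + offset]) (by omega)
    exact hnil (n + 1 - 1).toNat 1 [] (le_refl _)
  · have hA := backtrackA_eq n offset (n - k + 1) (n + 1 - 1).toNat 1 [] (n - k + 1).toNat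
      (le_refl _) (by simp; omega)
    rw [hA]
    have hb : n + 1 + offset = n + offset + 1 := by ring
    by_cases hbig : max n 0 < n - k + 1
    · rw [if_pos (Or.inr hbig)]
      rw [combosB_eq_nil _ _ (by rw [PySem.List.length_pyRange_one]; omega)]
      simp
    · rw [if_neg (by omega)]
      simp [hb]
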